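-- pv_equiv track=rewrite | github.com/dac-nh/vietnam-text-mining | Tools/CheckAccurate.py | get_data_from_file
-- ===== SOURCE A (Python) =====
-- def get_data_from_file(lines):
--     """
--     Get keyword from text file
--     :param lines:
--     :return: result{date:{category:{paper:{keyword:[],}}}}
--     """
--     # Processing file 1
--     position = 0
--     result = {}
--     current_date = ''
--     current_category = ''
--     current_paper = ''
--     while position < len(lines) - 5:
--         if current_date != lines[position]:
--             current_date = lines[position]
--             current_category = lines[position + 1]
--             current_paper = lines[position + 2]
--
--             result[current_date] = {}  # date
--             result[current_date][current_category] = {}  # category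
--             result[current_date][current_category][current_paper] = {'keywords': [], 'keyword-weight': []}  # paper
--         elif current_category != lines[position + 1]:
--             current_category = lines[position + 1]
--             current_paper = lines[position + 2]
--
--             result[current_date][current_category] = {}  # category
--             result[current_date][current_category][current_paper] = {'keywords': [], 'keyword-weight': []}  # paper
--         elif current_paper != lines[position + 2]:
--             current_paper = lines[position + 2]
--
--             result[current_date][current_category][current_paper] = {'keywords': [], 'keyword-weight': []}  # paper
--         result[current_date][current_category][current_paper]['keywords'].append(lines[position + 3])
--         # 2018-05-04: Data to write keyword and weight to file
--         result[current_date][current_category][current_paper]['keyword-weight'].append(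
--             '{0}: {1}'.format(lines[position + 3], lines[position + 4]))
--         position += 5
--     return result
-- ===== SOURCE B (Python) =====
-- from itertools import groupby
--
--
-- def get_data_from_file(lines):
--     """
--     Get keyword from text file
--     :param lines:
--     :return: result{date:{category:{paper:{keyword:[],}}}}
--     """
--     chunks = [(lines[p], lines[p + 1], lines[p + 2], lines[p + 3], lines[p + 4])
--               for p in range(0, len(lines) - 5, 5)]
--     result = {}
--     for date, g1 in groupby(chunks, key=lambda c: c[0]):
--         cats = {}
--         for cat, g2 in groupby(g1, key=lambda c: c[1]):
--             papers = {}
--             for paper, g3 in groupby(g2, key=lambda c: c[2]):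
--                 run = list(g3)
--                 papers[paper] = {'keywords': [c[3] for c in run],
--                                  'keyword-weight': ['{0}: {1}'.format(c[3], c[4]) for c in run]}
--             cats[cat] = papers
--         result[date] = cats
--     return result
-- ===== Notes on version B (the rewrite author's own statement) =====
-- stated objective: idiomatic
-- what changed: A is a single-pass while-loop state machine that mutates a nested dict guarded by current_date/current_category/current_paper comparison chains; B first materialises the list of 5-line chunks and then builds the nested dict bottom-up with nested itertools.groupby runs (date, category, paper), constructing each inner dict as a whole before inserting it.
import Mathlib
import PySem

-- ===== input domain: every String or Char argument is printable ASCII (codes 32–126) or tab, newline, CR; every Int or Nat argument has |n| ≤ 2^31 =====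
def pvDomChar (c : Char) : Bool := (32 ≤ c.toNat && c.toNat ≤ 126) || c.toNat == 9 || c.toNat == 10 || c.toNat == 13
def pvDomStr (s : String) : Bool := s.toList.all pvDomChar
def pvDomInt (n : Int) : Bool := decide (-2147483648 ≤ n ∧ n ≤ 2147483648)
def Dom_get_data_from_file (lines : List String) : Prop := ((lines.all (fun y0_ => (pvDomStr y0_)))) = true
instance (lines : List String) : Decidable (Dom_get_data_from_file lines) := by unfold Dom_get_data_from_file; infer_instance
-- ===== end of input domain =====

-- B replaces A's single-pass mutating state machine by a chunk list + nested consecutive grouping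
-- (itertools.groupby) that builds each inner dict as a whole before inserting it; return values agree on Pre_.

-- shared type abbreviations for the nested dict result
abbrev PRec := PySem.Dict String (List String)
abbrev PPap := PySem.Dict String PRec
abbrev PCat := PySem.Dict String PPap
abbrev PRes := PySem.Dict String PCat
abbrev Chunk5 := String × String × String × String × String
abbrev StA := PRes × String × String × String

-- shared glue: '{0}: {1}'.format(k, w)
def fmtKW (k w : String) : String := k ++ ": " ++ w

-- shared glue: the dict-of-dicts return value rendered under the type convention (assoc lists)
def dictToOut (r : PRes) : List (String × List (String × List (String × List (String × List String)))) :=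
  r.items.map (fun dm => (dm.1, dm.2.items.map (fun cm =>
    (cm.1, cm.2.items.map (fun pm => (pm.1, pm.2.items))))))

-- ===== PORT A =====
-- {'keywords': [], 'keyword-weight': []}
def rec0 : PRec := PySem.Dict.ofList [("keywords", []), ("keyword-weight", [])]

-- one iteration of A's while body; (d, c, p, k, w) = lines[position..position+4] (pure list reads,
-- fetched once per iteration).  The Dict.modify defaults are never used on Pre_ (the Python would
-- raise KeyError exactly where the key is absent; Pre_ excludes those inputs).
def stepA (s : StA) (ch : Chunk5) : StA :=
  match s, ch with
  | (result, current_date, current_category, current_paper), (d, c, p, k, w) =>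
    let st : StA :=
      if current_date ≠ d then
        let current_date := d
        let current_category := c
        let current_paper := p
        let result := result.insert current_date PySem.Dict.empty
        let result := result.modify current_date PySem.Dict.empty
          (fun m => m.insert current_category PySem.Dict.empty)
        let result := result.modify current_date PySem.Dict.empty
          (fun m => m.modify current_category PySem.Dict.empty (fun q => q.insert current_paper rec0))
        (result, current_date, current_category, current_paper)
      else if current_category ≠ c then
        let current_category := c
        let current_paper := p
        let result := result.modify current_date PySem.Dict.empty
          (fun m => m.insert current_category PySem.Dict.empty)
        let result := result.modify current_date PySem.Dict.empty
          (fun m => m.modify current_category PySem.Dict.empty (fun q => q.insert current_paper rec0))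
        (result, current_date, current_category, current_paper)
      else if current_paper ≠ p then
        let current_paper := p
        let result := result.modify current_date PySem.Dict.empty
          (fun m => m.modify current_category PySem.Dict.empty (fun q => q.insert current_paper rec0))
        (result, current_date, current_category, current_paper)
      else (result, current_date, current_category, current_paper)
    match st with
    | (result, current_date, current_category, current_paper) =>
      let result := result.modify current_date PySem.Dict.empty (fun m =>
        m.modify current_category PySem.Dict.empty (fun q =>
          q.modify current_paper PySem.Dict.empty (fun r =>
            r.modify "keywords" [] (fun l => l ++ [k]))))
      let result := result.modify current_date PySem.Dict.empty (fun m =>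
        m.modify current_category PySem.Dict.empty (fun q =>
          q.modify current_paper PySem.Dict.empty (fun r =>
            r.modify "keyword-weight" [] (fun l => l ++ [fmtKW k w]))))
      (result, current_date, current_category, current_paper)

-- A's while loop: position starts at 0 and advances by 5 while position < len(lines) - 5
def loopA (lines : List String) (pos : Nat) (s : StA) : StA :=
  if h : (pos : Int) < (lines.length : Int) - 5 then
    loopA lines (pos + 5)
      (stepA s (PySem.List.pyGetD lines (pos : Int) "", PySem.List.pyGetD lines ((pos : Int) + 1) "",
                PySem.List.pyGetD lines ((pos : Int) + 2) "", PySem.List.pyGetD lines ((pos : Int) + 3) "",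
                PySem.List.pyGetD lines ((pos : Int) + 4) ""))
  else s
termination_by lines.length - pos
decreasing_by omega

def get_data_from_file (lines : List String) :
    List (String × List (String × List (String × List (String × List String)))) :=
  dictToOut (loopA lines 0 (PySem.Dict.empty, "", "", "")).1

-- ===== PORT B =====
-- chunks = [(lines[p], lines[p+1], lines[p+2], lines[p+3], lines[p+4]) for p in range(0, len(lines)-5, 5)]
def chunksOf (lines : List String) : List Chunk5 :=
  (PySem.List.pyRange 0 ((lines.length : Int) - 5) 5).map (fun p =>
    (PySem.List.pyGetD lines p "", PySem.List.pyGetD lines (p + 1) "",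
     PySem.List.pyGetD lines (p + 2) "", PySem.List.pyGetD lines (p + 3) "",
     PySem.List.pyGetD lines (p + 4) ""))

-- itertools.groupby(l, key): the list of (key value, consecutive run) pairs
def runsBy (key : Chunk5 → String) (l : List Chunk5) : List (String × List Chunk5) :=
  l.foldr (fun c acc =>
    match acc with
    | [] => [(key c, [c])]
    | (g, run) :: t => if key c == g then (g, c :: run) :: t else (key c, [c]) :: (g, run) :: t) []

-- {'keywords': ks, 'keyword-weight': ws}
def recOf (ks ws : List String) : PRec := PySem.Dict.ofList [("keywords", ks), ("keyword-weight", ws)]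

def buildPapers (runs : List (String × List Chunk5)) (papers : PPap) : PPap :=
  runs.foldl (fun papers pr =>
    papers.insert pr.1 (recOf (pr.2.map (fun c => c.2.2.2.1))
                              (pr.2.map (fun c => fmtKW c.2.2.2.1 c.2.2.2.2)))) papers

def buildCats (runs : List (String × List Chunk5)) (cats : PCat) : PCat :=
  runs.foldl (fun cats cr =>
    cats.insert cr.1 (buildPapers (runsBy (fun c => c.2.2.1) cr.2) PySem.Dict.empty)) cats

def buildDates (runs : List (String × List Chunk5)) (result : PRes) : PRes :=
  runs.foldl (fun result dr =>
    result.insert dr.1 (buildCats (runsBy (fun c => c.2.1) dr.2) PySem.Dict.empty)) result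

def get_data_from_file_alt (lines : List String) :
    List (String × List (String × List (String × List (String × List String)))) :=
  dictToOut (buildDates (runsBy (fun c => c.1) (chunksOf lines)) PySem.Dict.empty)

-- ===== PRECONDITION & SPEC =====
-- Pre_ excludes exactly the inputs where A raises KeyError: at least one chunk (6 ≤ len) whose first
-- line is '' — current_date starts as '', so the first iteration skips the date branch and indexes result[''].
def Pre_get_data_from_file (lines : List String) : Prop :=
  ¬ (6 ≤ lines.length ∧ lines.head? = some "")
instance (lines : List String) : Decidable (Pre_get_data_from_file lines) := by
  unfold Pre_get_data_from_file; infer_instance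

def pvWitness_get_data_from_file : List String := ["d1", "cat", "paper", "kw", "3", "end"]

def Spec_get_data_from_file (lines : List String)
    (out : List (String × List (String × List (String × List (String × List String))))) : Prop :=
  out = get_data_from_file_alt lines

-- decidable equality for the nested return type, built stepwise (the default instance search
-- gives up on the deeply nested product/list type)
def pvDecEq2 : DecidableEq (String × List String) := inferInstance
def pvDecEq3 : DecidableEq (List (String × List String)) := by letI := pvDecEq2; infer_instance
def pvDecEq4 : DecidableEq (String × List (String × List String)) := by
  letI := pvDecEq3; infer_instance
def pvDecEq5 : DecidableEq (List (String × List (String × List String))) := by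
  letI := pvDecEq4; infer_instance
def pvDecEq6 : DecidableEq (String × List (String × List (String × List String))) := by
  letI := pvDecEq5; infer_instance
def pvDecEq7 : DecidableEq (List (String × List (String × List (String × List String)))) := by
  letI := pvDecEq6; infer_instance
def pvDecEq8 : DecidableEq (String × List (String × List (String × List (String × List String)))) := by
  letI := pvDecEq7; infer_instance
def pvDecEq9 :
    DecidableEq (List (String × List (String × List (String × List (String × List String))))) := by
  letI := pvDecEq8; infer_instance

instance (lines : List String)
    (out : List (String × List (String × List (String × List (String × List String))))) :
    Decidable (Spec_get_data_from_file lines out) := by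
  unfold Spec_get_data_from_file; exact pvDecEq9 out _

-- ===== CLAIM (what is proved, stated in full; the proofs are below) =====
def Claim_equal_get_data_from_file : Prop :=
  ∀ (lines : List String), Dom_get_data_from_file lines → Pre_get_data_from_file lines →
    Spec_get_data_from_file lines (get_data_from_file lines)

-- ===== LEMMAS AND PROOFS =====

-- ---- generic dict facts ----
lemma modify_insert_self {κ ν : Type} [BEq κ] [LawfulBEq κ]
    (d : PySem.Dict κ ν) (k : κ) (v dflt : ν) (f : ν → ν) :
    (d.insert k v).modify k dflt f = d.insert k (f v) := by
  simp [PySem.Dict.modify, PySem.Dict.getD_insert_self, PySem.Dict.insert_insert_self]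

lemma recOf_modify_k (ks ws : List String) (f : List String → List String) :
    (recOf ks ws).modify "keywords" [] f = recOf (f ks) ws := by rfl

lemma recOf_modify_w (ks ws : List String) (f : List String → List String) :
    (recOf ks ws).modify "keyword-weight" [] f = recOf ks (f ws) := by rfl

lemma rec0_eq : rec0 = recOf [] [] := rfl

lemma dropWhile_head_false {α : Type} (p : α → Bool) :
    ∀ (l : List α) {x : α} {xs : List α}, l.dropWhile p = x :: xs → p x = false := by
  intro l
  induction l with
  | nil => intro x xs h; simp [List.dropWhile] at h
  | cons a t ih =>
    intro x xs h
    by_cases hp : p a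
    · rw [List.dropWhile_cons_of_pos hp] at h; exact ih h
    · rw [List.dropWhile_cons_of_neg hp] at h
      obtain ⟨rfl, -⟩ := List.cons.inj h
      simpa using hp

-- ---- A's loop as a fold over its chunks ----
def chunksFrom (lines : List String) (pos : Nat) : List Chunk5 :=
  if h : (pos : Int) < (lines.length : Int) - 5 then
    (PySem.List.pyGetD lines (pos : Int) "", PySem.List.pyGetD lines ((pos : Int) + 1) "",
     PySem.List.pyGetD lines ((pos : Int) + 2) "", PySem.List.pyGetD lines ((pos : Int) + 3) "",
     PySem.List.pyGetD lines ((pos : Int) + 4) "") :: chunksFrom lines (pos + 5)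
  else []
termination_by lines.length - pos
decreasing_by omega

lemma loopA_eq_foldl (lines : List String) :
    ∀ (n pos : Nat), lines.length - pos ≤ n → ∀ (s : StA),
      loopA lines pos s = List.foldl stepA s (chunksFrom lines pos) := by
  intro n
  induction n with
  | zero =>
    intro pos hn s
    have hc : ¬ ((pos : Int) < (lines.length : Int) - 5) := by omega
    rw [loopA, chunksFrom, dif_neg hc, dif_neg hc]
    rfl
  | succ n ih =>
    intro pos hn s
    by_cases hc : (pos : Int) < (lines.length : Int) - 5
    · rw [loopA, chunksFrom, dif_pos hc, dif_pos hc, List.foldl_cons]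
      exact ih (pos + 5) (by omega) _
    · rw [loopA, chunksFrom, dif_neg hc, dif_neg hc]; rfl

lemma pyRange5_cons (a b : Int) (h : a < b) :
    PySem.List.pyRange a b 5 = a :: PySem.List.pyRange (a + 5) b 5 := by
  rw [PySem.List.pyRange_of_pos a b (show (0:Int) < 5 by norm_num),
      PySem.List.pyRange_of_pos (a + 5) b (show (0:Int) < 5 by norm_num)]
  have hn : (if a < b then ((b - a + 5 - 1) / 5).toNat else 0)
      = (if a + 5 < b then ((b - (a + 5) + 5 - 1) / 5).toNat else 0) + 1 := by
    split_ifs <;> omega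
  rw [hn, List.range_succ_eq_map, List.map_cons, List.map_map]
  congr 1
  · simp
  · refine List.map_congr_left fun k _ => ?_
    simp only [Function.comp]
    push_cast
    ring

lemma chunksOf_eq (lines : List String) : chunksOf lines = chunksFrom lines 0 := by
  have aux : ∀ (n pos : Nat), lines.length - pos ≤ n →
      (PySem.List.pyRange (pos : Int) ((lines.length : Int) - 5) 5).map (fun p =>
        (PySem.List.pyGetD lines p "", PySem.List.pyGetD lines (p + 1) "",
         PySem.List.pyGetD lines (p + 2) "", PySem.List.pyGetD lines (p + 3) "",
         PySem.List.pyGetD lines (p + 4) "")) = chunksFrom lines pos := by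
    intro n
    induction n with
    | zero =>
      intro pos hn
      have hc : ¬ ((pos : Int) < (lines.length : Int) - 5) := by omega
      rw [chunksFrom, dif_neg hc,
          PySem.List.pyRange_of_pos (pos : Int) ((lines.length : Int) - 5) (show (0:Int) < 5 by norm_num)]
      simp [hc]
    | succ n ih =>
      intro pos hn
      by_cases hc : (pos : Int) < (lines.length : Int) - 5
      · rw [chunksFrom, dif_pos hc, pyRange5_cons _ _ hc, List.map_cons]
        have h5 : ((pos : Int) + 5) = ((pos + 5 : Nat) : Int) := by push_cast; ring
        rw [h5, ih (pos + 5) (by omega)]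
      · rw [chunksFrom, dif_neg hc,
            PySem.List.pyRange_of_pos (pos : Int) ((lines.length : Int) - 5) (show (0:Int) < 5 by norm_num)]
        simp [hc]
  exact aux lines.length 0 (by omega)

-- ---- the itertools.groupby recursion equation ----
lemma runsBy_cons (key : Chunk5 → String) :
    ∀ (l : List Chunk5) (c : Chunk5),
      runsBy key (c :: l)
        = (key c, c :: l.takeWhile (fun x => key x == key c))
            :: runsBy key (l.dropWhile (fun x => key x == key c)) := by
  intro l
  induction l with
  | nil => intro c; rfl
  | cons x l' ih =>
    intro c
    by_cases hb : key c = key x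
    · have : runsBy key (c :: x :: l')
          = (match runsBy key (x :: l') with
             | [] => [(key c, [c])]
             | (g, run) :: t => if key c == g then (g, c :: run) :: t
               else (key c, [c]) :: (g, run) :: t) := rfl
      rw [this, ih x]
      simp [hb]
    · have : runsBy key (c :: x :: l')
          = (match runsBy key (x :: l') with
             | [] => [(key c, [c])]
             | (g, run) :: t => if key c == g then (g, c :: run) :: t
               else (key c, [c]) :: (g, run) :: t) := rfl
      have hbx : (key x == key c) = false := by
        simp [BEq.beq]; exact fun h => hb h.symm
      have hcx : (key c == key x) = false := by simp [hb]
      rw [this, ih x]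
      simp only [hcx, Bool.false_eq_true, if_false, List.takeWhile_cons, List.dropWhile_cons, hbx]
      rw [← ih x]

-- ---- collapsing one stepA per branch ----
lemma stepA_same (R : PRes) (C : PCat) (P : PPap) (d c p k w : String) (ks ws : List String) :
    stepA (R.insert d (C.insert c (P.insert p (recOf ks ws))), d, c, p) (d, c, p, k, w)
      = (R.insert d (C.insert c (P.insert p (recOf (ks ++ [k]) (ws ++ [fmtKW k w])))), d, c, p) := by
  simp [stepA, modify_insert_self, recOf_modify_k, recOf_modify_w]

lemma stepA_paper (R : PRes) (C : PCat) (Y : PPap) (d c cp p k w : String) (h : cp ≠ p) :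
    stepA (R.insert d (C.insert c Y), d, c, cp) (d, c, p, k, w)
      = (R.insert d (C.insert c (Y.insert p (recOf [k] [fmtKW k w]))), d, c, p) := by
  simp [stepA, h, modify_insert_self, rec0_eq, recOf_modify_k, recOf_modify_w]

lemma stepA_cat (R : PRes) (X : PCat) (d cc cp c p k w : String) (h : cc ≠ c) :
    stepA (R.insert d X, d, cc, cp) (d, c, p, k, w)
      = (R.insert d (X.insert c (PySem.Dict.empty.insert p (recOf [k] [fmtKW k w]))), d, c, p) := by
  simp [stepA, h, modify_insert_self, rec0_eq, recOf_modify_k, recOf_modify_w]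

lemma stepA_date (r : PRes) (cd cc cp d c p k w : String) (h : cd ≠ d) :
    stepA (r, cd, cc, cp) (d, c, p, k, w)
      = (r.insert d (PySem.Dict.empty.insert c
          (PySem.Dict.empty.insert p (recOf [k] [fmtKW k w]))), d, c, p) := by
  simp [stepA, h, modify_insert_self, rec0_eq, recOf_modify_k, recOf_modify_w]

-- ---- B-side continuations: what A's fold produces mid-run ----
def contPap (cs : List Chunk5) (P : PPap) (p : String) (ks ws : List String) : PPap :=
  buildPapers (runsBy (fun x => x.2.2.1) (cs.dropWhile (fun ch => ch.2.2.1 == p)))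
    (P.insert p (recOf (ks ++ (cs.takeWhile (fun ch => ch.2.2.1 == p)).map (fun c => c.2.2.2.1))
                       (ws ++ (cs.takeWhile (fun ch => ch.2.2.1 == p)).map
                          (fun c => fmtKW c.2.2.2.1 c.2.2.2.2))))

def contCat (cs : List Chunk5) (C : PCat) (c : String) (P : PPap) (p : String)
    (ks ws : List String) : PCat :=
  buildCats (runsBy (fun x => x.2.1) (cs.dropWhile (fun ch => ch.2.1 == c)))
    (C.insert c (contPap (cs.takeWhile (fun ch => ch.2.1 == c)) P p ks ws))

def contDate (cs : List Chunk5) (R : PRes) (d : String) (C : PCat) (c : String) (P : PPap)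
    (p : String) (ks ws : List String) : PRes :=
  buildDates (runsBy (fun x => x.1) (cs.dropWhile (fun ch => ch.1 == d)))
    (R.insert d (contCat (cs.takeWhile (fun ch => ch.1 == d)) C c P p ks ws))

lemma bridgeP (ch : Chunk5) (l : List Chunk5) (P : PPap) :
    contPap l P ch.2.2.1 [ch.2.2.2.1] [fmtKW ch.2.2.2.1 ch.2.2.2.2]
      = buildPapers (runsBy (fun x => x.2.2.1) (ch :: l)) P := by
  rw [runsBy_cons]
  simp [contPap, buildPapers]

lemma bridgeC (ch : Chunk5) (l : List Chunk5) (C : PCat) :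
    contCat l C ch.2.1 PySem.Dict.empty ch.2.2.1 [ch.2.2.2.1] [fmtKW ch.2.2.2.1 ch.2.2.2.2]
      = buildCats (runsBy (fun x => x.2.1) (ch :: l)) C := by
  rw [runsBy_cons]
  simp only [contCat, buildCats, List.foldl_cons]
  rw [bridgeP]

lemma bridgeD (ch : Chunk5) (l : List Chunk5) (R : PRes) :
    contDate l R ch.1 PySem.Dict.empty ch.2.1 PySem.Dict.empty ch.2.2.1
        [ch.2.2.2.1] [fmtKW ch.2.2.2.1 ch.2.2.2.2]
      = buildDates (runsBy (fun x => x.1) (ch :: l)) R := by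
  rw [runsBy_cons]
  simp only [contDate, buildDates, List.foldl_cons]
  rw [bridgeC]

-- ---- level lemmas ----
lemma Lrec : ∀ (run : List Chunk5) (d c p : String),
    (∀ ch ∈ run, ch.1 = d ∧ ch.2.1 = c ∧ ch.2.2.1 = p) →
    ∀ (R : PRes) (C : PCat) (P : PPap) (ks ws : List String),
    List.foldl stepA (R.insert d (C.insert c (P.insert p (recOf ks ws))), d, c, p) run
      = (R.insert d (C.insert c (P.insert p
          (recOf (ks ++ run.map (fun ch => ch.2.2.2.1))
                 (ws ++ run.map (fun ch => fmtKW ch.2.2.2.1 ch.2.2.2.2))))), d, c, p) := by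
  intro run
  induction run with
  | nil => intro d c p _ R C P ks ws; simp
  | cons ch t ih =>
    intro d c p h R C P ks ws
    obtain ⟨h1, h2, h3⟩ := h ch (by simp)
    obtain ⟨d', c', p', k, w⟩ := ch
    simp only at h1 h2 h3
    subst h1; subst h2; subst h3
    rw [List.foldl_cons, stepA_same,
        ih d' c' p' (fun x hx => h x (List.mem_cons_of_mem _ hx)) R C P (ks ++ [k]) (ws ++ [fmtKW k w])]
    simp

lemma Lpap : ∀ (n : Nat) (cs : List Chunk5), cs.length ≤ n → ∀ (d c : String),
    (∀ ch ∈ cs, ch.1 = d ∧ ch.2.1 = c) →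
    ∀ (R : PRes) (C : PCat) (P : PPap) (p : String) (ks ws : List String), ∃ p',
    List.foldl stepA (R.insert d (C.insert c (P.insert p (recOf ks ws))), d, c, p) cs
      = (R.insert d (C.insert c (contPap cs P p ks ws)), d, c, p') := by
  intro n
  induction n with
  | zero =>
    intro cs hn d c h R C P p ks ws
    have hnil : cs = [] := List.eq_nil_of_length_eq_zero (by omega)
    subst hnil
    exact ⟨p, by simp [contPap, runsBy, buildPapers]⟩
  | succ n ih =>
    intro cs hn d c h R C P p ks ws
    have hsplit : cs.takeWhile (fun ch => ch.2.2.1 == p) ++ cs.dropWhile (fun ch => ch.2.2.1 == p)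
        = cs := List.takeWhile_append_dropWhile
    have hfold : List.foldl stepA (R.insert d (C.insert c (P.insert p (recOf ks ws))), d, c, p) cs
        = List.foldl stepA
            (List.foldl stepA (R.insert d (C.insert c (P.insert p (recOf ks ws))), d, c, p)
              (cs.takeWhile (fun ch => ch.2.2.1 == p)))
            (cs.dropWhile (fun ch => ch.2.2.1 == p)) := by
      rw [← List.foldl_append, hsplit]
    have hrun := Lrec (cs.takeWhile (fun ch => ch.2.2.1 == p)) d c p
      (fun ch hch => by
        have hmem : ch ∈ cs := (List.takeWhile_prefix _).subset hch
        have hb := List.mem_takeWhile_imp hch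
        simp only [beq_iff_eq] at hb
        exact ⟨(h ch hmem).1, (h ch hmem).2, hb⟩)
      R C P ks ws
    rw [hfold, hrun]
    cases hdr : cs.dropWhile (fun ch => ch.2.2.1 == p) with
    | nil =>
      refine ⟨p, ?_⟩
      simp [contPap, hdr, runsBy, buildPapers]
    | cons ch rest2 =>
      have hfalse : (ch.2.2.1 == p) = false := dropWhile_head_false _ cs hdr
      have hmemdr : ∀ x ∈ ch :: rest2, x ∈ cs := by
        intro x hx
        exact (List.dropWhile_suffix _).subset (hdr ▸ hx)
      obtain ⟨hd1, hc1⟩ := h ch (hmemdr ch (by simp))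
      have hlen2 : rest2.length ≤ n := by
        have e2 : (cs.dropWhile (fun ch => ch.2.2.1 == p)).length = rest2.length + 1 := by
          rw [hdr]; rfl
        have e3 := List.length_dropWhile_le (fun (ch : Chunk5) => ch.2.2.1 == p) cs
        omega
      obtain ⟨d1, c1, p1, k1, w1⟩ := ch
      simp only at hd1 hc1 hfalse
      rw [hd1, hc1] at hdr ⊢
      have hne : p ≠ p1 := by
        intro he; rw [he] at hfalse; simp at hfalse
      rw [List.foldl_cons, stepA_paper _ _ _ _ _ _ _ _ _ hne]
      obtain ⟨p'', heq⟩ := ih rest2 hlen2 d c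
        (fun x hx => h x (hmemdr x (List.mem_cons_of_mem _ hx))) R C
        (P.insert p (recOf
          (ks ++ (cs.takeWhile (fun ch => ch.2.2.1 == p)).map (fun ch => ch.2.2.2.1))
          (ws ++ (cs.takeWhile (fun ch => ch.2.2.1 == p)).map
            (fun ch => fmtKW ch.2.2.2.1 ch.2.2.2.2))))
        p1 [k1] [fmtKW k1 w1]
      refine ⟨p'', ?_⟩
      rw [heq]
      have hb := bridgeP (d, c, p1, k1, w1) rest2
        (P.insert p (recOf
          (ks ++ (cs.takeWhile (fun ch => ch.2.2.1 == p)).map (fun ch => ch.2.2.2.1))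
          (ws ++ (cs.takeWhile (fun ch => ch.2.2.1 == p)).map
            (fun ch => fmtKW ch.2.2.2.1 ch.2.2.2.2))))
      simp only at hb
      rw [hb]
      have hcp : contPap cs P p ks ws
          = buildPapers (runsBy (fun x => x.2.2.1) ((d, c, p1, k1, w1) :: rest2))
              (P.insert p (recOf
                (ks ++ (cs.takeWhile (fun ch => ch.2.2.1 == p)).map (fun ch => ch.2.2.2.1))
                (ws ++ (cs.takeWhile (fun ch => ch.2.2.1 == p)).map
                  (fun ch => fmtKW ch.2.2.2.1 ch.2.2.2.2)))) := by
        simp only [contPap]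
        rw [hdr]
      rw [hcp]

lemma Lcat : ∀ (n : Nat) (cs : List Chunk5), cs.length ≤ n → ∀ (d : String),
    (∀ ch ∈ cs, ch.1 = d) →
    ∀ (R : PRes) (C : PCat) (c : String) (P : PPap) (p : String) (ks ws : List String), ∃ c' p',
    List.foldl stepA (R.insert d (C.insert c (P.insert p (recOf ks ws))), d, c, p) cs
      = (R.insert d (contCat cs C c P p ks ws), d, c', p') := by
  intro n
  induction n with
  | zero =>
    intro cs hn d h R C c P p ks ws
    have hnil : cs = [] := List.eq_nil_of_length_eq_zero (by omega)
    subst hnil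
    exact ⟨c, p, by simp [contCat, contPap, runsBy, buildPapers, buildCats]⟩
  | succ n ih =>
    intro cs hn d h R C c P p ks ws
    have hsplit : cs.takeWhile (fun ch => ch.2.1 == c) ++ cs.dropWhile (fun ch => ch.2.1 == c)
        = cs := List.takeWhile_append_dropWhile
    have hfold : List.foldl stepA (R.insert d (C.insert c (P.insert p (recOf ks ws))), d, c, p) cs
        = List.foldl stepA
            (List.foldl stepA (R.insert d (C.insert c (P.insert p (recOf ks ws))), d, c, p)
              (cs.takeWhile (fun ch => ch.2.1 == c)))
            (cs.dropWhile (fun ch => ch.2.1 == c)) := by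
      rw [← List.foldl_append, hsplit]
    obtain ⟨p'', hrun⟩ := Lpap (cs.takeWhile (fun ch => ch.2.1 == c)).length
      (cs.takeWhile (fun ch => ch.2.1 == c)) (le_refl _) d c
      (fun ch hch => by
        have hmem : ch ∈ cs := (List.takeWhile_prefix _).subset hch
        have hb := List.mem_takeWhile_imp hch
        simp only [beq_iff_eq] at hb
        exact ⟨h ch hmem, hb⟩)
      R C P p ks ws
    rw [hfold, hrun]
    cases hdr : cs.dropWhile (fun ch => ch.2.1 == c) with
    | nil =>
      refine ⟨c, p'', ?_⟩
      simp [contCat, hdr, runsBy, buildCats]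
    | cons ch rest2 =>
      have hfalse : (ch.2.1 == c) = false := dropWhile_head_false _ cs hdr
      have hmemdr : ∀ x ∈ ch :: rest2, x ∈ cs := by
        intro x hx
        exact (List.dropWhile_suffix _).subset (hdr ▸ hx)
      have hd1 := h ch (hmemdr ch (by simp))
      have hlen2 : rest2.length ≤ n := by
        have e2 : (cs.dropWhile (fun ch => ch.2.1 == c)).length = rest2.length + 1 := by
          rw [hdr]; rfl
        have e3 := List.length_dropWhile_le (fun (ch : Chunk5) => ch.2.1 == c) cs
        omega
      obtain ⟨d1, c1, p1, k1, w1⟩ := ch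
      simp only at hd1 hfalse
      rw [hd1] at hdr ⊢
      have hne : c ≠ c1 := by
        intro he; rw [he] at hfalse; simp at hfalse
      rw [List.foldl_cons, stepA_cat _ _ _ _ _ _ _ _ _ hne]
      obtain ⟨c''', p''', heq⟩ := ih rest2 hlen2 d
        (fun x hx => h x (hmemdr x (List.mem_cons_of_mem _ hx))) R
        (C.insert c (contPap (cs.takeWhile (fun ch => ch.2.1 == c)) P p ks ws))
        c1 PySem.Dict.empty p1 [k1] [fmtKW k1 w1]
      refine ⟨c''', p''', ?_⟩
      rw [heq]
      have hb := bridgeC (d, c1, p1, k1, w1) rest2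
        (C.insert c (contPap (cs.takeWhile (fun ch => ch.2.1 == c)) P p ks ws))
      simp only at hb
      rw [hb]
      have hcc : contCat cs C c P p ks ws
          = buildCats (runsBy (fun x => x.2.1) ((d, c1, p1, k1, w1) :: rest2))
              (C.insert c (contPap (cs.takeWhile (fun ch => ch.2.1 == c)) P p ks ws)) := by
        simp only [contCat]
        rw [hdr]
      rw [hcc]

lemma Ldate : ∀ (n : Nat) (cs : List Chunk5), cs.length ≤ n →
    ∀ (R : PRes) (d : String) (C : PCat) (c : String) (P : PPap) (p : String)
      (ks ws : List String), ∃ d' c' p',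
    List.foldl stepA (R.insert d (C.insert c (P.insert p (recOf ks ws))), d, c, p) cs
      = (contDate cs R d C c P p ks ws, d', c', p') := by
  intro n
  induction n with
  | zero =>
    intro cs hn R d C c P p ks ws
    have hnil : cs = [] := List.eq_nil_of_length_eq_zero (by omega)
    subst hnil
    exact ⟨d, c, p, by simp [contDate, contCat, contPap, runsBy, buildPapers, buildCats, buildDates]⟩
  | succ n ih =>
    intro cs hn R d C c P p ks ws
    have hsplit : cs.takeWhile (fun ch => ch.1 == d) ++ cs.dropWhile (fun ch => ch.1 == d)
        = cs := List.takeWhile_append_dropWhile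
    have hfold : List.foldl stepA (R.insert d (C.insert c (P.insert p (recOf ks ws))), d, c, p) cs
        = List.foldl stepA
            (List.foldl stepA (R.insert d (C.insert c (P.insert p (recOf ks ws))), d, c, p)
              (cs.takeWhile (fun ch => ch.1 == d)))
            (cs.dropWhile (fun ch => ch.1 == d)) := by
      rw [← List.foldl_append, hsplit]
    obtain ⟨c'', p'', hrun⟩ := Lcat (cs.takeWhile (fun ch => ch.1 == d)).length
      (cs.takeWhile (fun ch => ch.1 == d)) (le_refl _) d
      (fun ch hch => by
        have hb := List.mem_takeWhile_imp hch
        simp only [beq_iff_eq] at hb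
        exact hb)
      R C c P p ks ws
    rw [hfold, hrun]
    cases hdr : cs.dropWhile (fun ch => ch.1 == d) with
    | nil =>
      refine ⟨d, c'', p'', ?_⟩
      simp [contDate, hdr, runsBy, buildDates]
    | cons ch rest2 =>
      have hfalse : (ch.1 == d) = false := dropWhile_head_false _ cs hdr
      have hlen2 : rest2.length ≤ n := by
        have e2 : (cs.dropWhile (fun ch => ch.1 == d)).length = rest2.length + 1 := by
          rw [hdr]; rfl
        have e3 := List.length_dropWhile_le (fun (ch : Chunk5) => ch.1 == d) cs
        omega
      obtain ⟨d1, c1, p1, k1, w1⟩ := ch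
      simp only at hfalse
      have hne : d ≠ d1 := by
        intro he; rw [he] at hfalse; simp at hfalse
      rw [List.foldl_cons, stepA_date _ _ _ _ _ _ _ _ _ hne]
      obtain ⟨d''', c''', p''', heq⟩ := ih rest2 hlen2
        (R.insert d (contCat (cs.takeWhile (fun ch => ch.1 == d)) C c P p ks ws))
        d1 PySem.Dict.empty c1 PySem.Dict.empty p1 [k1] [fmtKW k1 w1]
      refine ⟨d''', c''', p''', ?_⟩
      rw [heq]
      have hb := bridgeD (d1, c1, p1, k1, w1) rest2
        (R.insert d (contCat (cs.takeWhile (fun ch => ch.1 == d)) C c P p ks ws))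
      simp only at hb
      rw [hb]
      have hcd : contDate cs R d C c P p ks ws
          = buildDates (runsBy (fun x => x.1) ((d1, c1, p1, k1, w1) :: rest2))
              (R.insert d (contCat (cs.takeWhile (fun ch => ch.1 == d)) C c P p ks ws)) := by
        simp only [contDate]
        rw [hdr]
      rw [hcd]

-- ===== VERDICT (by name: the statement is the Claim_ definition above) =====
theorem get_data_from_file_spec : Claim_equal_get_data_from_file := by
  intro lines _ hpre
  unfold Spec_get_data_from_file get_data_from_file get_data_from_file_alt
  rw [loopA_eq_foldl lines lines.length 0 (by omega), chunksOf_eq]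
  cases hc : chunksFrom lines 0 with
  | nil => rfl
  | cons ch rest =>
    rw [chunksFrom] at hc
    split_ifs at hc with h6
    · have hch : ch = (PySem.List.pyGetD lines ((0 : Nat) : Int) "",
          PySem.List.pyGetD lines (((0 : Nat) : Int) + 1) "",
          PySem.List.pyGetD lines (((0 : Nat) : Int) + 2) "",
          PySem.List.pyGetD lines (((0 : Nat) : Int) + 3) "",
          PySem.List.pyGetD lines (((0 : Nat) : Int) + 4) "") := (List.cons.inj hc).1.symm
      have hrest : chunksFrom lines 5 = rest := (List.cons.inj hc).2
      have hlen : 6 ≤ lines.length := by omega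
      have hne : ch.1 ≠ "" := by
        cases lines with
        | nil => simp at hlen
        | cons a tl =>
          have ha : a ≠ "" := by
            intro hae
            exact hpre ⟨hlen, by rw [hae]; rfl⟩
          rw [hch]
          simpa [PySem.List.pyGetD_zero] using ha
      obtain ⟨d, c, p, k, w⟩ := ch
      simp only at hne
      rw [List.foldl_cons, stepA_date _ _ _ _ _ _ _ _ _ (fun he => hne he.symm)]
      obtain ⟨d', c', p', heq⟩ := Ldate rest.length rest (le_refl _)
        PySem.Dict.empty d PySem.Dict.empty c PySem.Dict.empty p [k] [fmtKW k w]
      rw [heq]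
      have hb := bridgeD (d, c, p, k, w) rest PySem.Dict.empty
      simp only at hb
      rw [hb]
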